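-- pv_equiv track=rewrite | github.com/natalie-o-perret/coding-challenges | HackerRank/1 - Algorithms/2 - Strings/5 - Funny String.py | is_funny
-- ===== SOURCE A (Python) =====
-- def is_funny(S):
-- 	N = len(S)
-- 	for i in range(1, N):
-- 		Si = ord(S[i])
-- 		Si_1 = ord(S[i - 1])
-- 		Ri_1 = ord(S[(N - 1) - i])
-- 		Ri = ord(S[(N - 1) - (i - 1)])
-- 		Sdiff = abs(Si - Si_1)
-- 		Rdiff = abs(Ri - Ri_1)
-- 		if Sdiff != Rdiff:
-- 			return False
-- 	return True
-- ===== SOURCE B (Python) =====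
-- def is_funny(S):
-- 	diffs = [abs(ord(y) - ord(x)) for x, y in zip(S, S[1:])]
-- 	return diffs == diffs[::-1]
-- ===== Notes on version B (the rewrite author's own statement) =====
-- stated objective: simpler
-- what changed: B builds the list of adjacent absolute differences in one zip pass and returns whether that list is a palindrome (diffs == diffs[::-1]), replacing A's interleaved per-index comparison of forward and mirrored diffs with early exit.
import Mathlib
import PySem

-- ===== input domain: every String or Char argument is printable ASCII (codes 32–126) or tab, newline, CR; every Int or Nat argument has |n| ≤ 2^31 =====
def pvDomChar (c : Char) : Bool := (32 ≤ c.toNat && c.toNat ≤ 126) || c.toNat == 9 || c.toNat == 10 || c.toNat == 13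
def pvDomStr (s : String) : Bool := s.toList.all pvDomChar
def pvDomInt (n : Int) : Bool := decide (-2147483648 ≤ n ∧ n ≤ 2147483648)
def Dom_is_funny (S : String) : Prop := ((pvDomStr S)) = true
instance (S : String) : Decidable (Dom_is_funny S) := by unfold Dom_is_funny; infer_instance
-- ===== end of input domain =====

-- B builds the adjacent-absolute-difference list once and tests it for being a palindrome,
-- replacing A's interleaved per-index comparison of forward and mirrored diffs (simpler decomposition, same cost).

-- ===== PORT A =====
-- per-index loop over range(1, N); List.all short-circuits like A's 'return False'
def is_funny (S : String) : Bool :=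
  let cs := S.toList
  let N : Int := PySem.Str.len S
  (PySem.List.pyRange 1 N 1).all (fun i =>
    match PySem.List.pyGet? cs i, PySem.List.pyGet? cs (i - 1),
          PySem.List.pyGet? cs ((N - 1) - i), PySem.List.pyGet? cs ((N - 1) - (i - 1)) with
    | some Si, some Si_1, some Ri_1, some Ri =>
        ((Si.toNat : Int) - (Si_1.toNat : Int)).natAbs == ((Ri.toNat : Int) - (Ri_1.toNat : Int)).natAbs
    | _, _, _, _ => false)   -- unreachable: all four indices are in range for i ∈ range(1, N)

-- ===== PORT B =====
-- diffs = [abs(ord(y) - ord(x)) for x, y in zip(S, S[1:])]; return diffs == diffs[::-1]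
def is_funny_alt (S : String) : Bool :=
  let cs := S.toList
  let diffs := (cs.zip (PySem.List.slice cs (some 1) none)).map
      (fun p => ((p.2.toNat : Int) - (p.1.toNat : Int)).natAbs)
  diffs == diffs.reverse

-- ===== PRECONDITION & SPEC =====
def Spec_is_funny (S : String) (out : Bool) : Prop := out = is_funny_alt S
instance (S : String) (out : Bool) : Decidable (Spec_is_funny S out) := by unfold Spec_is_funny; infer_instance

-- ===== CLAIM (what is proved, stated in full; the proofs are below) =====
def Claim_equal_is_funny : Prop := ∀ (S : String), Dom_is_funny S → Spec_is_funny S (is_funny S)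

-- ===== LEMMAS AND PROOFS =====

-- the absolute difference of the adjacent pair at position k (proof-side helper)
def pvDd (cs : List Char) (k : Nat) : Nat :=
  (((cs.getD (k + 1) 'a').toNat : Int) - ((cs.getD k 'a').toNat : Int)).natAbs

theorem pyGet_getD (cs : List Char) (i : Int) (m : Nat) (h0 : 0 ≤ i) (he : i.toNat = m)
    (hm : m < cs.length) : PySem.List.pyGet? cs i = some (cs.getD m 'a') := by
  rw [PySem.List.pyGet?_eq_some_getElem cs h0 (by omega), List.getD_eq_getElem cs 'a' hm]
  simp [he]

-- A returns True iff every adjacent diff equals its mirror diff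
theorem is_funny_iff (S : String) :
    is_funny S = true ↔
      ∀ k < S.toList.length - 1, pvDd S.toList k = pvDd S.toList (S.toList.length - 2 - k) := by
  unfold is_funny
  simp only [PySem.Str.len_eq, PySem.List.pyRange_one, List.all_map, List.all_eq_true,
    List.mem_range, Function.comp_apply]
  have key : ∀ k, k < S.toList.length - 1 →
      ((match PySem.List.pyGet? S.toList (1 + (k:Int)),
              PySem.List.pyGet? S.toList (1 + (k:Int) - 1),
              PySem.List.pyGet? S.toList ((S.toList.length:Int) - 1 - (1 + (k:Int))),
              PySem.List.pyGet? S.toList ((S.toList.length:Int) - 1 - (1 + (k:Int) - 1)) with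
        | some Si, some Si_1, some Ri_1, some Ri =>
            ((Si.toNat : Int) - (Si_1.toNat : Int)).natAbs == ((Ri.toNat : Int) - (Ri_1.toNat : Int)).natAbs
        | _, _, _, _ => false) = true ↔ pvDd S.toList k = pvDd S.toList (S.toList.length - 2 - k)) := by
    intro k hk
    rw [pyGet_getD _ _ (k + 1) (by omega) (by omega) (by omega),
        pyGet_getD _ _ k (by omega) (by omega) (by omega),
        pyGet_getD _ _ (S.toList.length - 2 - k) (by omega) (by omega) (by omega),
        pyGet_getD _ _ (S.toList.length - 1 - k) (by omega) (by omega) (by omega)]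
    simp only [beq_iff_eq]
    rw [pvDd, pvDd, show S.toList.length - 2 - k + 1 = S.toList.length - 1 - k by omega]
  constructor
  · intro h k hk
    exact (key k hk).mp (h k (by omega))
  · intro h k hk
    have hk' : k < S.toList.length - 1 := by omega
    exact (key k hk').mpr (h k hk')

-- B returns True iff the same per-index condition holds (palindrome test, read off index by index)
theorem is_funny_alt_iff (S : String) :
    is_funny_alt S = true ↔
      ∀ k < S.toList.length - 1, pvDd S.toList k = pvDd S.toList (S.toList.length - 2 - k) := by
  unfold is_funny_alt
  set cs := S.toList with hcs
  simp only [PySem.List.slice_from_one]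
  set D := (cs.zip cs.tail).map (fun p => ((p.2.toNat : Int) - (p.1.toNat : Int)).natAbs) with hD
  have hlen : D.length = cs.length - 1 := by
    simp [hD, List.length_zip, List.length_tail]
  have hget : ∀ j (h : j < cs.length - 1), D[j]'(by omega) = pvDd cs j := by
    intro j h
    have h1 : j < cs.length := by omega
    have h2 : j + 1 < cs.length := by omega
    simp [hD, pvDd, List.getElem_zip, List.getElem_tail, h1, h2]
  rw [beq_iff_eq]
  constructor
  · intro hEq k hk
    have hk' : k < D.length := by omega
    have this := List.getElem_of_eq hEq hk'
    simp only [List.getElem_reverse] at this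
    rw [hget k hk, hget (D.length - 1 - k) (by omega)] at this
    rw [show D.length - 1 - k = cs.length - 2 - k by omega] at this
    exact this
  · intro hall
    apply List.ext_getElem (by simp [hlen])
    intro j h1 h2
    simp only [List.getElem_reverse]
    rw [hget j (by omega), hget (D.length - 1 - j) (by omega),
        show D.length - 1 - j = cs.length - 2 - j by omega]
    exact hall j (by omega)

-- ===== VERDICT (by name: the statement is the Claim_ definition above) =====
theorem is_funny_spec : Claim_equal_is_funny := by
  intro S _
  unfold Spec_is_funny
  have h := (is_funny_iff S).trans (is_funny_alt_iff S).symm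
  cases hA : is_funny S <;> cases hB : is_funny_alt S <;> simp_all
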